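-- pv_equiv track=rewrite | github.com/moisesroyal/GitVisualCode | Algoritmica/Abstraccion.py | f
-- ===== SOURCE A (Python) =====
-- def f(x):
--
--     a = 0
--
--     for i in range(1000):
--         a += 1
--
--     for i in range (x):
--         a += x
--
--     for i in range (x):
--         for j in range (x):
--             a += 1
--             a += 1
--
--     return a
-- ===== SOURCE B (Python) =====
-- def f(x):
--     return 1000 + 3 * max(x, 0) ** 2
-- ===== Notes on version B (the rewrite author's own statement) =====
-- stated objective: faster
-- what changed: Replaced the quadratic accumulation loops with a constant-time closed-form expression of x.
import Mathlib
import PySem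

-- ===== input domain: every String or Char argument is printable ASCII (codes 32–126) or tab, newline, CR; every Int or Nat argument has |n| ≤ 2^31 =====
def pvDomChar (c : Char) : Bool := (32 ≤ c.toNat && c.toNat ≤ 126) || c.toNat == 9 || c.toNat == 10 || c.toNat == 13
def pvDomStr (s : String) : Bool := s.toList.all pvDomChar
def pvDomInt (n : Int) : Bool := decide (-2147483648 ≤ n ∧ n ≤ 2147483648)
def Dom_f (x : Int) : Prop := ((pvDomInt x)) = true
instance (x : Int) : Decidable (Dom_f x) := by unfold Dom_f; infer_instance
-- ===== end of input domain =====

-- B replaces A's O(x^2) nested loops by the closed form 1000 + 3*max(x,0)^2 (faster, asymptotic).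


-- ===== PORT A =====
def f (x : Int) : Int :=
  let a : Int := 0
  let a := (PySem.List.pyRange 0 1000 1).foldl (fun a _ => a + 1) a
  let a := (PySem.List.pyRange 0 x 1).foldl (fun a _ => a + x) a
  let a := (PySem.List.pyRange 0 x 1).foldl (fun a _ =>
      (PySem.List.pyRange 0 x 1).foldl (fun a _ => (a + 1) + 1) a) a
  a

-- ===== PORT B =====
def f_alt (x : Int) : Int := 1000 + 3 * (max x 0) ^ 2

-- ===== PRECONDITION & SPEC =====
def Spec_f (x : Int) (out : Int) : Prop := out = f_alt x
instance (x : Int) (out : Int) : Decidable (Spec_f x out) := by unfold Spec_f; infer_instance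

-- ===== CLAIM (what is proved, stated in full; the proofs are below) =====
def Claim_equal_f : Prop := ∀ (x : Int), Dom_f x → Spec_f x (f x)

-- ===== LEMMAS AND PROOFS =====
theorem foldl_add_const {α : Type} (c : Int) (l : List α) (init : Int) :
    l.foldl (fun a _ => a + c) init = init + l.length * c := by
  induction l generalizing init with
  | nil => simp
  | cons h t ih => simp [List.foldl, ih]; ring

theorem foldl_add_two {α : Type} (l : List α) (init : Int) :
    l.foldl (fun a _ => (a + 1) + 1) init = init + l.length * 2 := by
  induction l generalizing init with
  | nil => simp
  | cons h t ih => simp [List.foldl, ih]; ring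

theorem foldl_nested (x : Int) (l : List Int) (init : Int) :
    l.foldl (fun a _ => (PySem.List.pyRange 0 x 1).foldl (fun a _ => (a + 1) + 1) a) init
      = init + l.length * ((PySem.List.pyRange 0 x 1).length * 2) := by
  induction l generalizing init with
  | nil => simp
  | cons h t ih =>
    simp only [List.foldl, foldl_add_two, foldl_add_const]
    rw [List.length_cons]; push_cast; ring

-- ===== VERDICT (by name: the statement is the Claim_ definition above) =====
theorem f_spec : Claim_equal_f := by
  intro x _
  unfold Spec_f f f_alt
  simp only [foldl_add_const, foldl_nested, PySem.List.length_pyRange_one]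
  by_cases hx : 0 ≤ x
  · have h0 : ((x - 0).toNat : Int) = x := by omega
    have hm : max x 0 = x := max_eq_left hx
    rw [h0, hm]
    norm_num; ring
  · have h0 : ((x - 0).toNat : Int) = 0 := by omega
    have hm : max x 0 = 0 := max_eq_right (by omega)
    rw [h0, hm]
    norm_num
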